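-- pv_equiv track=rewrite | github.com/Sal1699/exa-dune | scripts/python/sip_pcap_creds.py | parse_sip_message
-- ===== SOURCE A (Python) =====
-- def parse_sip_message(payload_str):
--     """Parsa un messaggio SIP e ritorna headers come dict"""
--     lines = payload_str.replace('\r\n', '\n').split('\n')
--     headers = {}
--     first_line = lines[0] if lines else ""
--     for line in lines[1:]:
--         if ':' in line:
--             key, _, val = line.partition(':')
--             key = key.strip().lower()
--             val = val.strip()
--             headers.setdefault(key, []).append(val)
--     return first_line, headers
-- ===== SOURCE B (Python) =====
-- def parse_sip_message(payload_str):
--     """Parsa un messaggio SIP e ritorna headers come dict.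
--
--     One fused character-level scan: lines are cut at '\n' or '\r\n' on the
--     fly (no intermediate replaced string, no split call), and each header line is
--     cut at the first ':' found by index instead of partition().
--     """
--     lines = []
--     buf = []
--     i, n = 0, len(payload_str)
--     while i < n:
--         ch = payload_str[i]
--         if ch == '\n':
--             lines.append(''.join(buf)); buf = []; i += 1
--         elif ch == '\r' and i + 1 < n and payload_str[i + 1] == '\n':
--             lines.append(''.join(buf)); buf = []; i += 2
--         else:
--             buf.append(ch); i += 1
--     lines.append(''.join(buf))
--     headers = {}
--     for line in lines[1:]:
--         c = line.find(':')
--         if c >= 0: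
--             key = line[:c].strip().lower()
--             headers.setdefault(key, []).append(line[c + 1:].strip())
--     return lines[0], headers
-- ===== Notes on version B (the rewrite author's own statement) =====
-- stated objective: alternative
-- what changed: B replaces A's three passes (CRLF-to-LF replace, then split on newlines, then a loop using membership plus partition) by one fused character-level scan that cuts lines at LF or CRLF inline and cuts each header line at the first colon found by index.
import Mathlib
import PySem

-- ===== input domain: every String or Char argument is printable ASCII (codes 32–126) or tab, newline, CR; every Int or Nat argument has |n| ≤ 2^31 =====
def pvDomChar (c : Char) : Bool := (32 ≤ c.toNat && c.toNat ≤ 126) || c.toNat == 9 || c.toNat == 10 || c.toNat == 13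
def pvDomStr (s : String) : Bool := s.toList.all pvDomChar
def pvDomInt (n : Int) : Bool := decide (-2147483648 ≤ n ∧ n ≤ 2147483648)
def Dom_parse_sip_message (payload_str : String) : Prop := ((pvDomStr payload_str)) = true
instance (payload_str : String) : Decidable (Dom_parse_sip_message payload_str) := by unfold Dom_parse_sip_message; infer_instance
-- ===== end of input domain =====

-- B replaces A's replace/split/partition passes by one fused character-level scan (objective: alternative).

-- ===== PORT A =====
-- hand port of str.partition(sep) for nonempty sep: split at the FIRST occurrence (exact)
def pyPartition (s : String) (sep : String) : String × String × String :=
  let i := PySem.Str.find s sep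
  if i = -1 then (s, "", "")
  else (PySem.Str.slice s none (some i), sep, PySem.Str.slice s (some (i + PySem.Str.len sep)) none)

def parse_sip_message (payload_str : String) : String × (List (String × List String)) :=
  let lines := (PySem.Str.split? (PySem.Str.replace payload_str "\r\n" "\n") "\n").getD []
  let first_line := match lines with | [] => "" | l0 :: _ => l0
  let headers := (PySem.List.slice lines (some 1) none).foldl
    (fun d line =>
      if PySem.Str.isIn ":" line then
        let p := pyPartition line ":"
        let key := PySem.Str.lower (PySem.Str.strip p.1)
        let val := PySem.Str.strip p.2.2
        PySem.Dict.modify d key [] (fun vs => vs ++ [val])   -- headers.setdefault(key, []).append(val)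
      else d)
    PySem.Dict.empty
  (first_line, headers.items)

-- ===== PORT B =====
-- B's scan loop: cut lines at LF or CRLF inline, carrying the current-line buffer
def pvScanLines (buf : List Char) (cs : List Char) : List (List Char) :=
  match cs with
  | [] => [buf]
  | c :: rest =>
    if c = '\n' then buf :: pvScanLines [] rest
    else if c = '\r' ∧ rest.head? = some '\n' then buf :: pvScanLines [] rest.tail
    else pvScanLines (buf ++ [c]) rest
termination_by cs.length
decreasing_by
  · simp
  · simp only [List.length_cons, List.length_tail]; omega
  · simp

-- B's header-line step: find the first colon by index; line[:c] / line[c+1:] with 0 ≤ c are take/drop (exact)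
def pvHeaderLine (d : PySem.Dict String (List String)) (line : List Char) : PySem.Dict String (List String) :=
  let c := PySem.Chars.find line [':']
  if 0 ≤ c then
    let key := String.ofList (PySem.Chars.lower (PySem.Chars.strip (line.take c.toNat)))
    let val := String.ofList (PySem.Chars.strip (line.drop (c.toNat + 1)))
    PySem.Dict.modify d key [] (fun vs => vs ++ [val])   -- headers.setdefault(key, []).append(...)
  else d

def parse_sip_message_alt (payload_str : String) : String × (List (String × List String)) :=
  match pvScanLines [] payload_str.toList with
  | [] => ("", [])   -- unreachable: pvScanLines always returns at least one line
  | l0 :: rest => (String.ofList l0, (rest.foldl pvHeaderLine PySem.Dict.empty).items)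

-- ===== PRECONDITION & SPEC =====
def Spec_parse_sip_message (payload_str : String) (out : String × (List (String × List String))) : Prop := out = parse_sip_message_alt payload_str
instance (payload_str : String) (out : String × (List (String × List String))) : Decidable (Spec_parse_sip_message payload_str out) := by unfold Spec_parse_sip_message; infer_instance

-- ===== CLAIM (what is proved, stated in full; the proofs are below) =====
def Claim_equal_parse_sip_message : Prop := ∀ (payload_str : String), Dom_parse_sip_message payload_str → Spec_parse_sip_message payload_str (parse_sip_message payload_str)

-- ===== LEMMAS AND PROOFS =====

-- reference versions of A's CRLF-to-LF replace and newline split, structural on the char list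
def pvRep : List Char → List Char
  | [] => []
  | [c] => [c]
  | c :: d :: rest => if c = '\r' ∧ d = '\n' then '\n' :: pvRep rest else c :: pvRep (d :: rest)

def pvSplit : List Char → List (List Char)
  | [] => [[]]
  | c :: rest =>
    if c = '\n' then [] :: pvSplit rest
    else (c :: (pvSplit rest).headD []) :: (pvSplit rest).tail

theorem pvSplit_ne_nil (cs : List Char) : pvSplit cs ≠ [] := by
  cases cs with
  | nil => simp [pvSplit]
  | cons c rest => simp only [pvSplit]; split_ifs <;> simp

theorem pvRep_cons_lf (rest : List Char) : pvRep ('\n' :: rest) = '\n' :: pvRep rest := by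
  cases rest with
  | nil => rfl
  | cons d r => simp [pvRep]

theorem pvRep_crlf (rest : List Char) : pvRep ('\r' :: '\n' :: rest) = '\n' :: pvRep rest := by
  simp [pvRep]

theorem pvRep_cons_other (c : Char) (rest : List Char)
    (h : ¬(c = '\r' ∧ rest.head? = some '\n')) : pvRep (c :: rest) = c :: pvRep rest := by
  cases rest with
  | nil => rfl
  | cons d r =>
    simp only [List.head?_cons, Option.some.injEq] at h
    simp [pvRep, h]

theorem replace_go_eq (fuel : Nat) (l acc : List Char) (h : l.length ≤ fuel) :
    PySem.Chars.replace.go ['\r', '\n'] ['\n'] fuel l acc = acc.reverse ++ pvRep l := by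
  induction fuel generalizing l acc with
  | zero =>
    rw [PySem.Chars.replace.go.eq_def]
    interval_cases hl : l.length
    · simp at hl; simp [hl, pvRep]
  | succ n ih =>
    rw [PySem.Chars.replace.go.eq_def]
    cases l with
    | nil => simp [pvRep]
    | cons c t =>
      by_cases hp : List.isPrefixOf ['\r', '\n'] (c :: t) = true
      · simp only [hp, if_true]
        obtain ⟨c', t', rfl⟩ : ∃ c' t', t = c' :: t' := by
          cases t with
          | nil => simp [List.isPrefixOf] at hp
          | cons a b => exact ⟨a, b, rfl⟩
        have hc : '\r' = c ∧ '\n' = c' := by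
          simpa [List.isPrefixOf] using hp
        obtain ⟨h1, h2⟩ := hc
        subst h1; subst h2
        simp only [List.length_cons, List.length_nil, List.drop_succ_cons, List.drop_zero]
        rw [ih t' _ (by simp at h ⊢; omega)]
        simp [pvRep_crlf]
      · simp only [hp]
        rw [ih t _ (by simp at h ⊢; omega)]
        have hne : ¬(c = '\r' ∧ t.head? = some '\n') := by
          rintro ⟨rfl, hh⟩
          cases t with
          | nil => simp at hh
          | cons a b =>
            simp at hh
            subst hh
            simp [List.isPrefixOf] at hp
        rw [pvRep_cons_other c t hne]
        simp

theorem replace_eq (cs : List Char) :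
    PySem.Chars.replace cs ['\r', '\n'] ['\n'] = pvRep cs := by
  rw [PySem.Chars.replace]
  simp only [List.isEmpty_cons]
  simpa using replace_go_eq cs.length cs [] Nat.le.refl

theorem splitOn_go_eq (fuel : Nat) (l cur : List Char) (acc : List (List Char)) (h : l.length ≤ fuel) :
    PySem.Chars.splitOn.go ['\n'] fuel l cur acc
      = acc.reverse ++ (pvSplit l).modifyHead (cur.reverse ++ ·) := by
  induction fuel generalizing l cur acc with
  | zero =>
    rw [PySem.Chars.splitOn.go.eq_def]
    interval_cases hl : l.length
    · simp at hl; simp [hl, pvSplit]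
  | succ n ih =>
    rw [PySem.Chars.splitOn.go.eq_def]
    cases l with
    | nil => simp [pvSplit]
    | cons c t =>
      by_cases hc : c = '\n'
      · subst hc
        have hp : List.isPrefixOf ['\n'] ('\n' :: t) = true := by simp [List.isPrefixOf]
        simp only [hp, if_true]
        simp only [List.length_cons, List.length_nil, List.drop_succ_cons, List.drop_zero]
        rw [ih t [] _ (by simp at h ⊢; omega)]
        have hid : List.modifyHead (fun x : List Char => x) (pvSplit t) = pvSplit t := by
          cases pvSplit t <;> simp
        simp [pvSplit, hid]
      · have hp : List.isPrefixOf ['\n'] (c :: t) = true → False := by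
          simp [List.isPrefixOf]; intro h'; exact hc h'.symm
        simp only [eq_false hp, if_false]
        rw [ih t (c :: cur) acc (by simp at h ⊢; omega)]
        obtain ⟨p, ps, hps⟩ : ∃ p ps, pvSplit t = p :: ps := by
          cases hq : pvSplit t with
          | nil => exact absurd hq (pvSplit_ne_nil t)
          | cons a b => exact ⟨a, b, rfl⟩
        simp [pvSplit, hc, hps]

theorem splitOn_eq (cs : List Char) :
    PySem.Chars.splitOn cs ['\n'] = pvSplit cs := by
  rw [PySem.Chars.splitOn]
  rw [splitOn_go_eq (cs.length + 1) cs [] [] (by omega)]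
  obtain ⟨p, ps, hps⟩ : ∃ p ps, pvSplit cs = p :: ps := by
    cases hq : pvSplit cs with
    | nil => exact absurd hq (pvSplit_ne_nil cs)
    | cons a b => exact ⟨a, b, rfl⟩
  simp [hps]

theorem pvScanLines_eq (cs buf : List Char) :
    pvScanLines buf cs = (pvSplit (pvRep cs)).modifyHead (buf ++ ·) := by
  induction buf, cs using pvScanLines.induct with
  | case1 buf => simp [pvScanLines, pvRep, pvSplit]
  | case2 buf rest ih =>
    rw [pvScanLines, if_pos rfl, ih, pvRep_cons_lf]
    obtain ⟨p, ps, hps⟩ : ∃ p ps, pvSplit (pvRep rest) = p :: ps := by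
      cases hq : pvSplit (pvRep rest) with
      | nil => exact absurd hq (pvSplit_ne_nil _)
      | cons a b => exact ⟨a, b, rfl⟩
    simp [pvSplit, hps]
  | case3 buf c rest hc hcr ih =>
    obtain ⟨rfl, hh⟩ := hcr
    obtain ⟨t, rfl⟩ : ∃ t, rest = '\n' :: t := by
      cases rest with
      | nil => simp at hh
      | cons a b => simp at hh; exact ⟨b, by rw [hh]⟩
    simp only [List.tail_cons] at ih
    rw [pvScanLines, if_neg (by exact hc), if_pos ⟨rfl, by simp⟩, List.tail_cons, ih, pvRep_crlf]
    obtain ⟨p, ps, hps⟩ : ∃ p ps, pvSplit (pvRep t) = p :: ps := by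
      cases hq : pvSplit (pvRep t) with
      | nil => exact absurd hq (pvSplit_ne_nil _)
      | cons a b => exact ⟨a, b, rfl⟩
    simp [pvSplit, hps]
  | case4 buf c rest hc hcr ih =>
    rw [pvScanLines, if_neg hc, if_neg hcr, ih, pvRep_cons_other c rest (by
      rintro ⟨rfl, hh⟩; exact hcr ⟨rfl, hh⟩)]
    obtain ⟨p, ps, hps⟩ : ∃ p ps, pvSplit (pvRep rest) = p :: ps := by
      cases hq : pvSplit (pvRep rest) with
      | nil => exact absurd hq (pvSplit_ne_nil _)
      | cons a b => exact ⟨a, b, rfl⟩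
    simp [pvSplit, hc, hps]

-- A's loop body on a line equals B's, through String.ofList
theorem stepA_eq_pvHeaderLine (d : PySem.Dict String (List String)) (l : List Char) :
    (if PySem.Str.isIn ":" (String.ofList l) then
        let p := pyPartition (String.ofList l) ":"
        let key := PySem.Str.lower (PySem.Str.strip p.1)
        let val := PySem.Str.strip p.2.2
        PySem.Dict.modify d key [] (fun vs => vs ++ [val])
      else d) = pvHeaderLine d l := by
  have hfind : PySem.Str.find (String.ofList l) ":" = PySem.Chars.find l [':'] := by
    simp [PySem.Str.find_eq]
  by_cases h : (0 : Int) ≤ PySem.Chars.find l [':']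
  · have hin : PySem.Str.isIn ":" (String.ofList l) = true := by
      simp only [PySem.Str.isIn_eq, String.toList_ofList]
      rw [PySem.Chars.isIn_iff_infix]
      exact (PySem.Chars.find_nonneg_iff l [':']).mp h
    have hne : PySem.Chars.find l [':'] ≠ -1 := by omega
    rw [if_pos hin]
    simp only [pyPartition, hfind, if_neg hne]
    rw [pvHeaderLine]
    simp only [if_pos h]
    have hto : PySem.Chars.find l [':'] = ((PySem.Chars.find l [':']).toNat : Int) := by omega
    have hkey : PySem.Str.lower (PySem.Str.strip (PySem.Str.slice (String.ofList l) none (some (PySem.Chars.find l [':']))))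
        = String.ofList (PySem.Chars.lower (PySem.Chars.strip (l.take (PySem.Chars.find l [':']).toNat))) := by
      simp only [PySem.Str.lower, PySem.Str.strip, PySem.Str.slice, String.toList_ofList]
      rw [PySem.Chars.slice_eq_listSlice, hto, PySem.List.slice_to_natCast]
      simp
      have h2 : (max (PySem.Chars.find l [':']) 0).toNat = (PySem.Chars.find l [':']).toNat := by
        omega
      rw [h2]
    have hval : PySem.Str.strip (PySem.Str.slice (String.ofList l) (some (PySem.Chars.find l [':'] + PySem.Str.len ":")) none)
        = String.ofList (PySem.Chars.strip (l.drop ((PySem.Chars.find l [':']).toNat + 1))) := by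
      simp only [PySem.Str.strip, PySem.Str.slice, String.toList_ofList]
      rw [PySem.Chars.slice_eq_listSlice, PySem.Str.len_eq]
      have h1 : PySem.Chars.find l [':'] + (↑(String.toList ":").length : Int)
          = (((PySem.Chars.find l [':']).toNat + 1 : Nat) : Int) := by
        have : ((String.toList ":").length : Int) = 1 := by decide
        rw [this]; omega
      rw [h1, PySem.List.slice_from _ (by positivity)]
      simp
      have h2 : (max (PySem.Chars.find l [':']) 0 + 1).toNat = (PySem.Chars.find l [':']).toNat + 1 := by
        omega
      rw [h2]
    rw [hkey, hval]
  · have hin : PySem.Str.isIn ":" (String.ofList l) = false := by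
      simp only [PySem.Str.isIn_eq, String.toList_ofList]
      rw [PySem.Chars.isIn_eq_false_iff]
      intro hinf
      exact h ((PySem.Chars.find_nonneg_iff l [':']).mpr hinf)
    rw [if_neg (fun hx => by rw [hin] at hx; exact Bool.false_ne_true hx), pvHeaderLine, if_neg h]

theorem parse_eq (payload_str : String) :
    parse_sip_message payload_str = parse_sip_message_alt payload_str := by
  rw [parse_sip_message, parse_sip_message_alt]
  have hlines : (PySem.Str.split? (PySem.Str.replace payload_str "\r\n" "\n") "\n").getD []
      = (pvSplit (pvRep payload_str.toList)).map String.ofList := by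
    rw [PySem.Str.split?, PySem.Chars.split?]
    have hsep : (String.toList "\n").isEmpty = false := by decide
    simp only [hsep, Bool.false_eq_true, if_false, Option.map_some, Option.getD_some]
    rw [show (PySem.Str.replace payload_str "\r\n" "\n").toList
        = PySem.Chars.replace payload_str.toList "\r\n".toList "\n".toList from by
      simp [PySem.Str.replace]]
    rw [show "\r\n".toList = ['\r', '\n'] from by decide, show "\n".toList = ['\n'] from by decide]
    rw [replace_eq, splitOn_eq]
  rw [hlines, pvScanLines_eq]
  obtain ⟨p, ps, hps⟩ : ∃ p ps, pvSplit (pvRep payload_str.toList) = p :: ps := by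
    cases hq : pvSplit (pvRep payload_str.toList) with
    | nil => exact absurd hq (pvSplit_ne_nil _)
    | cons a b => exact ⟨a, b, rfl⟩
  rw [hps]
  simp only [List.map_cons, List.modifyHead_cons, List.nil_append, PySem.List.slice_from_one,
    List.tail_cons]
  refine congrArg _ (congrArg _ ?_)
  rw [List.foldl_map]
  exact PySem.List.foldl_congr_mem _ _ _ _ (fun d x _ => stepA_eq_pvHeaderLine d x)

-- ===== VERDICT (by name: the statement is the Claim_ definition above) =====
theorem parse_sip_message_spec : Claim_equal_parse_sip_message := by
  intro payload_str _
  unfold Spec_parse_sip_message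
  exact parse_eq payload_str
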